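-- pv_equiv track=rewrite | github.com/Canbomm/UNB | 1 Semestre/Questionários/Questionário 9/Questão 05/AjudaMaisOTainda.py | trabalhaVetor
-- ===== SOURCE A (Python) =====
-- def trabalhaVetor(lista):
--     ocorrenciasPos = {}
--     for index,num in enumerate(lista):
--         if ocorrenciasPos.get(num) != None:
--             ocorrenciasPos[num][0] += 1
--         else:
--             ocorrenciasPos[num] = [1,index]
--     return ocorrenciasPos
-- ===== SOURCE B (Python) =====
-- def trabalhaVetor(lista):
--     # Pass 1: full count table.
--     contagens = {}
--     for num in lista:
--         contagens[num] = contagens.get(num, 0) + 1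
--     # Pass 2: first-occurrence detection, preserving first-occurrence key order.
--     resultado = {}
--     for index, num in enumerate(lista):
--         if num not in resultado:
--             resultado[num] = [contagens[num], index]
--     return resultado
-- ===== Notes on version B (the rewrite author's own statement) =====
-- stated objective: alternative
-- what changed: Single combined pass that increments a stored count cell in place is replaced by two differently-shaped passes: first build a complete count table, then scan enumerate(lista) inserting [count, index] only at each value's first occurrence.
import Mathlib
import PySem

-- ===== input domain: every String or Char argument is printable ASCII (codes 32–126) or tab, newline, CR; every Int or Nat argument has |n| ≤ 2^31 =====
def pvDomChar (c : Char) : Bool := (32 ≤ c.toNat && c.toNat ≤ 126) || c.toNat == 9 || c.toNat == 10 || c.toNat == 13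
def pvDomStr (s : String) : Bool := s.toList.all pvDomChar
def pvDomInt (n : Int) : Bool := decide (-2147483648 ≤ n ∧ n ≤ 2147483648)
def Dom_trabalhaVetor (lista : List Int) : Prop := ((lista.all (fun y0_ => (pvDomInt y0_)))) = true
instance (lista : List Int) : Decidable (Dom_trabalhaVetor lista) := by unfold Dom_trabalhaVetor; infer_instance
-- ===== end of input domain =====

-- B replaces A's single combined counting/indexing pass by two separate passes
-- (a full count table, then a first-occurrence scan): an alternative decomposition, same cost.


-- ===== PORT A =====
-- loop body of A: if the key is present, ocorrenciasPos[num][0] += 1, else ocorrenciasPos[num] = [1, index]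
def stepA (d : PySem.Dict Int (List Int)) (p : Int × Int) : PySem.Dict Int (List Int) :=
  if d.get? p.2 ≠ none then
    d.modify p.2 [] (fun v => PySem.List.pySetD v 0 (PySem.List.pyGetD v 0 0 + 1))
  else d.insert p.2 [1, p.1]

def trabalhaVetor (lista : List Int) : List (Int × List Int) :=
  ((PySem.List.enumerate lista 0).foldl stepA PySem.Dict.empty).items

-- ===== PORT B =====
-- pass 1 of B: contagens[num] = contagens.get(num, 0) + 1
def contagensB (lista : List Int) : PySem.Dict Int Int :=
  lista.foldl (fun d x => d.insert x (d.getD x 0 + 1)) PySem.Dict.empty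

-- pass 2 body of B: if num not in resultado: resultado[num] = [contagens[num], index]
-- (contagens[num] never raises here since num ∈ lista; getD 0 is exact on that domain)
def stepB (c : PySem.Dict Int Int) (r : PySem.Dict Int (List Int)) (p : Int × Int) :
    PySem.Dict Int (List Int) :=
  if ¬ r.contains p.2 then r.insert p.2 [c.getD p.2 0, p.1] else r

def trabalhaVetor_alt (lista : List Int) : List (Int × List Int) :=
  let contagens := contagensB lista
  ((PySem.List.enumerate lista 0).foldl (stepB contagens) PySem.Dict.empty).items

-- ===== PRECONDITION & SPEC =====
def Spec_trabalhaVetor (lista : List Int) (out : List (Int × List Int)) : Prop := out = trabalhaVetor_alt lista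
instance (lista : List Int) (out : List (Int × List Int)) : Decidable (Spec_trabalhaVetor lista out) := by unfold Spec_trabalhaVetor; infer_instance

-- ===== CLAIM (what is proved, stated in full; the proofs are below) =====
def Claim_equal_trabalhaVetor : Prop := ∀ (lista : List Int), Dom_trabalhaVetor lista → Spec_trabalhaVetor lista (trabalhaVetor lista)

-- ===== LEMMAS AND PROOFS =====

-- keys of A's fold: every element of l is appended on first sight
theorem keysA (l : List Int) : ∀ (i : Int) (d : PySem.Dict Int (List Int)),
    ((PySem.List.enumerate l i).foldl stepA d).keys = PySem.Set.update d.keys l := by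
  induction l with
  | nil => intro i d; simp [PySem.List.enumerate_nil, PySem.Set.update_nil]
  | cons x xs ih =>
    intro i d
    rw [PySem.List.enumerate_cons, List.foldl_cons, ih, PySem.Set.update_cons]
    congr 1
    by_cases h : d.get? x = none
    · have hc : d.contains x = false := by
        rw [PySem.Dict.contains_eq_isSome_get?, h]; rfl
      have hm : x ∉ d.keys := by
        intro hmem
        have := (PySem.Dict.contains_iff_mem_keys (d := d) (k := x)).mpr hmem
        rw [hc] at this; exact Bool.false_ne_true this
      simp [stepA, h, PySem.Dict.keys_insert_of_not_contains d _ hc,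
        PySem.Set.add_of_not_mem hm]
    · have hc : d.contains x = true := by
        rw [PySem.Dict.contains_eq_isSome_get?]
        cases hg : d.get? x with
        | none => exact absurd hg h
        | some v => rfl
      have hm : x ∈ d.keys := (PySem.Dict.contains_iff_mem_keys (d := d) (k := x)).mp hc
      have hck : d.contains x = true := hc
      simp [stepA, h, PySem.Dict.keys_modify, PySem.Dict.keys_insert_of_contains d _ hck,
        PySem.Set.add_of_mem hm]

-- keys of B's second fold: identical shape
theorem keysB (c : PySem.Dict Int Int) (l : List Int) :
    ∀ (i : Int) (d : PySem.Dict Int (List Int)),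
    ((PySem.List.enumerate l i).foldl (stepB c) d).keys = PySem.Set.update d.keys l := by
  induction l with
  | nil => intro i d; simp [PySem.List.enumerate_nil, PySem.Set.update_nil]
  | cons x xs ih =>
    intro i d
    rw [PySem.List.enumerate_cons, List.foldl_cons, ih, PySem.Set.update_cons]
    congr 1
    by_cases h : d.contains x = true
    · have hm : x ∈ d.keys := (PySem.Dict.contains_iff_mem_keys (d := d) (k := x)).mp h
      simp [stepB, h, PySem.Set.add_of_mem hm]
    · have hc : d.contains x = false := by
        cases hb : d.contains x with
        | false => rfl
        | true => exact absurd hb h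
      have hm : x ∉ d.keys := by
        intro hmem
        have := (PySem.Dict.contains_iff_mem_keys (d := d) (k := x)).mpr hmem
        rw [hc] at this; exact Bool.false_ne_true this
      simp [stepB, hc, PySem.Dict.keys_insert_of_not_contains d _ hc,
        PySem.Set.add_of_not_mem hm]

-- iterating "set head to head+1" then bumping the head by m = one bump by m+1
theorem setget_comp (v : List Int) (m : Int) :
    PySem.List.pySetD (PySem.List.pySetD v 0 (PySem.List.pyGetD v 0 0 + 1)) 0
      (PySem.List.pyGetD (PySem.List.pySetD v 0 (PySem.List.pyGetD v 0 0 + 1)) 0 0 + m) =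
    PySem.List.pySetD v 0 (PySem.List.pyGetD v 0 0 + (m + 1)) := by
  rw [PySem.List.pySetD_of_nonneg _ _ (by norm_num),
      PySem.List.pySetD_of_nonneg _ _ (by norm_num),
      PySem.List.pySetD_of_nonneg _ _ (by norm_num)]
  cases v with
  | nil => simp
  | cons h t =>
    simp [PySem.List.pyGetD_zero]
    ring_nf

theorem setget_self (v : List Int) :
    PySem.List.pySetD v 0 (PySem.List.pyGetD v 0 0) = v := by
  rw [PySem.List.pySetD_of_nonneg _ _ (by norm_num)]
  cases v with
  | nil => simp
  | cons h t => simp [PySem.List.pyGetD_zero]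

theorem stepA_of_contains (d : PySem.Dict Int (List Int)) (i x : Int)
    (h : d.contains x = true) :
    stepA d (i, x) = d.modify x [] (fun v => PySem.List.pySetD v 0 (PySem.List.pyGetD v 0 0 + 1)) := by
  have hg : d.get? x ≠ none := by
    rw [PySem.Dict.contains_eq_isSome_get?] at h
    cases hx : d.get? x with
    | none => rw [hx] at h; simp at h
    | some v => simp
  simp [stepA, hg]

theorem stepA_of_not_contains (d : PySem.Dict Int (List Int)) (i x : Int)
    (h : d.contains x = false) :
    stepA d (i, x) = d.insert x [1, i] := by
  have hg : d.get? x = none := by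
    rw [PySem.Dict.contains_eq_isSome_get?] at h
    cases hx : d.get? x with
    | none => rfl
    | some v => rw [hx] at h; simp at h
  simp [stepA, hg]

-- value characterisation of A's fold
theorem getDA (l : List Int) : ∀ (i : Int) (d : PySem.Dict Int (List Int)) (k : Int),
    ((PySem.List.enumerate l i).foldl stepA d).getD k [] =
      if d.contains k then
        PySem.List.pySetD (d.getD k []) 0 (PySem.List.pyGetD (d.getD k []) 0 0 + (l.count k : Int))
      else if k ∈ l then [(l.count k : Int), i + (l.idxOf k : Int)]
      else [] := by
  induction l with
  | nil =>
    intro i d k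
    simp only [PySem.List.enumerate_nil, List.foldl_nil, List.count_nil, List.not_mem_nil,
      if_false, Int.natCast_zero, add_zero, setget_self]
    split_ifs with h
    · rfl
    · exact PySem.Dict.getD_of_not_contains d [] (by cases hb : d.contains k with
        | false => rfl
        | true => exact absurd hb h)
  | cons x xs ih =>
    intro i d k
    rw [PySem.List.enumerate_cons, List.foldl_cons]
    by_cases hxk : x = k
    · subst hxk
      by_cases hdx : d.contains x = true
      · rw [stepA_of_contains d i x hdx, ih, if_pos hdx]
        have hc : (d.modify x [] (fun v => PySem.List.pySetD v 0 (PySem.List.pyGetD v 0 0 + 1))).contains x = true := by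
          rw [PySem.Dict.contains_modify]; simp [hdx]
        rw [if_pos hc, PySem.Dict.getD_modify_self, setget_comp, List.count_cons_self]
        push_cast; ring_nf
      · have hdx' : d.contains x = false := by
          cases hb : d.contains x with
          | false => rfl
          | true => exact absurd hb hdx
        rw [stepA_of_not_contains d i x hdx', ih,
            if_pos (PySem.Dict.contains_insert_self d x [1, i]),
            PySem.Dict.getD_insert_self, if_neg (by simp [hdx']),
            if_pos (List.mem_cons_self),
            PySem.List.pySetD_of_nonneg _ _ (by norm_num)]
        simp [PySem.List.pyGetD_zero, List.count_cons_self, List.idxOf_cons_self]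
        ring_nf
    · -- x ≠ k: the step leaves k's entry and presence alone
      have hkx : k ≠ x := fun h => hxk h.symm
      have hmem : (k ∈ x :: xs) ↔ (k ∈ xs) := by
        rw [List.mem_cons]
        exact or_iff_right (fun h => hkx h)
      have hidx : k ∈ xs → (((x :: xs).idxOf k : Nat) : Int) = ((xs.idxOf k : Nat) : Int) + 1 := by
        intro _
        rw [List.idxOf_cons_ne _ hxk]
        simp
      have hrest : ∀ d' : PySem.Dict Int (List Int),
          d'.contains k = d.contains k → d'.getD k [] = d.getD k [] →
          ((PySem.List.enumerate xs (i + 1)).foldl stepA d').getD k [] =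
          (if d.contains k then
            PySem.List.pySetD (d.getD k []) 0
              (PySem.List.pyGetD (d.getD k []) 0 0 + ((x :: xs).count k : Int))
          else if k ∈ x :: xs then [((x :: xs).count k : Int), i + ((x :: xs).idxOf k : Int)]
          else []) := by
        intro d' hcont hget
        rw [ih, hcont, hget, List.count_cons_of_ne hxk, List.idxOf_cons_ne _ hxk]
        simp only [hmem]
        have h1 : (((xs.idxOf k).succ : Nat) : Int) = ((xs.idxOf k : Nat) : Int) + 1 := by
          push_cast; ring
        rw [h1]
        have h2 : i + 1 + ((xs.idxOf k : Nat) : Int) = i + (((xs.idxOf k : Nat) : Int) + 1) := by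
          ring
        rw [h2]
      by_cases hdx : d.contains x = true
      · rw [stepA_of_contains d i x hdx]
        exact hrest _ (by rw [PySem.Dict.contains_modify]; simp [hkx])
          (PySem.Dict.getD_modify_of_ne d [] _ hkx)
      · have hdx' : d.contains x = false := by
          cases hb : d.contains x with
          | false => rfl
          | true => exact absurd hb hdx
        rw [stepA_of_not_contains d i x hdx']
        exact hrest _ (by rw [PySem.Dict.contains_insert]; simp [hkx])
          (PySem.Dict.getD_insert_of_ne d [1, i] [] hkx)

theorem stepB_of_contains (c : PySem.Dict Int Int) (r : PySem.Dict Int (List Int))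
    (i x : Int) (h : r.contains x = true) : stepB c r (i, x) = r := by
  simp [stepB, h]

theorem stepB_of_not_contains (c : PySem.Dict Int Int) (r : PySem.Dict Int (List Int))
    (i x : Int) (h : r.contains x = false) :
    stepB c r (i, x) = r.insert x [c.getD x 0, i] := by
  simp [stepB, h]

-- value characterisation of B's second fold
theorem getDB (c : PySem.Dict Int Int) (l : List Int) :
    ∀ (i : Int) (d : PySem.Dict Int (List Int)) (k : Int),
    ((PySem.List.enumerate l i).foldl (stepB c) d).getD k [] =
      if d.contains k then d.getD k []
      else if k ∈ l then [c.getD k 0, i + (l.idxOf k : Int)]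
      else [] := by
  induction l with
  | nil =>
    intro i d k
    simp only [PySem.List.enumerate_nil, List.foldl_nil, List.not_mem_nil, if_false]
    split_ifs with h
    · rfl
    · exact PySem.Dict.getD_of_not_contains d [] (by cases hb : d.contains k with
        | false => rfl
        | true => exact absurd hb h)
  | cons x xs ih =>
    intro i d k
    rw [PySem.List.enumerate_cons, List.foldl_cons]
    by_cases hxk : x = k
    · subst hxk
      by_cases hdx : d.contains x = true
      · rw [stepB_of_contains c d i x hdx, ih, if_pos hdx, if_pos hdx]
      · have hdx' : d.contains x = false := by
          cases hb : d.contains x with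
          | false => rfl
          | true => exact absurd hb hdx
        rw [stepB_of_not_contains c d i x hdx', ih,
            if_pos (PySem.Dict.contains_insert_self d x _),
            PySem.Dict.getD_insert_self]
        rw [if_neg (by simp [hdx'] : ¬ d.contains x = true),
            if_pos (List.mem_cons_self)]
        simp [List.idxOf_cons_self]
    · have hkx : k ≠ x := fun h => hxk h.symm
      have hmem : (k ∈ x :: xs) ↔ (k ∈ xs) := by
        rw [List.mem_cons]
        exact or_iff_right (fun h => hkx h)
      have hidx : k ∈ xs → (((x :: xs).idxOf k : Nat) : Int) = ((xs.idxOf k : Nat) : Int) + 1 := by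
        intro _
        rw [List.idxOf_cons_ne _ hxk]
        simp
      have hrest : ∀ d' : PySem.Dict Int (List Int),
          d'.contains k = d.contains k → d'.getD k [] = d.getD k [] →
          ((PySem.List.enumerate xs (i + 1)).foldl (stepB c) d').getD k [] =
          (if d.contains k then d.getD k []
          else if k ∈ x :: xs then [c.getD k 0, i + ((x :: xs).idxOf k : Int)]
          else []) := by
        intro d' hcont hget
        rw [ih, hcont, hget, List.idxOf_cons_ne _ hxk]
        simp only [hmem]
        have h1 : (((xs.idxOf k).succ : Nat) : Int) = ((xs.idxOf k : Nat) : Int) + 1 := by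
          push_cast; ring
        rw [h1]
        have h2 : i + 1 + ((xs.idxOf k : Nat) : Int) = i + (((xs.idxOf k : Nat) : Int) + 1) := by
          ring
        rw [h2]
      by_cases hdx : d.contains x = true
      · rw [stepB_of_contains c d i x hdx]
        exact hrest d rfl rfl
      · have hdx' : d.contains x = false := by
          cases hb : d.contains x with
          | false => rfl
          | true => exact absurd hb hdx
        rw [stepB_of_not_contains c d i x hdx']
        exact hrest _ (by rw [PySem.Dict.contains_insert]; simp [hkx])
          (PySem.Dict.getD_insert_of_ne d _ [] hkx)

theorem contagens_getD (lista : List Int) (k : Int) :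
    (contagensB lista).getD k 0 = (lista.count k : Int) := by
  unfold contagensB
  rw [PySem.Dict.getD_foldl_insert_add_one]
  simp [PySem.Dict.getD_empty]

-- ===== VERDICT (by name: the statement is the Claim_ definition above) =====
theorem trabalhaVetor_spec : Claim_equal_trabalhaVetor := by
  intro lista _
  unfold Spec_trabalhaVetor trabalhaVetor trabalhaVetor_alt
  have hkA := keysA lista 0 PySem.Dict.empty
  have hkB := keysB (contagensB lista) lista 0 PySem.Dict.empty
  rw [PySem.Dict.keys_empty, PySem.Set.update_nil_left] at hkA hkB
  have hndA : ((PySem.List.enumerate lista 0).foldl stepA PySem.Dict.empty).keys.Nodup := by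
    rw [hkA]; exact PySem.Set.nodup_ofList lista
  have hndB : ((PySem.List.enumerate lista 0).foldl (stepB (contagensB lista)) PySem.Dict.empty).keys.Nodup := by
    rw [hkB]; exact PySem.Set.nodup_ofList lista
  rw [PySem.Dict.items_eq_map_keys _ hndA ([] : List Int),
      PySem.Dict.items_eq_map_keys _ hndB ([] : List Int), hkA, hkB]
  apply List.map_congr_left
  intro k hk
  have hkl : k ∈ lista := (PySem.Set.mem_ofList lista k).mp hk
  rw [getDA lista 0 PySem.Dict.empty k, getDB (contagensB lista) lista 0 PySem.Dict.empty k]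
  simp [PySem.Dict.contains_empty, hkl, contagens_getD]
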